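-- pv_equiv track=rewrite | github.com/Hilal-Anwar/Python_Tutorial | oppes/test1.py | reverse_first_and_last_halves
-- ===== SOURCE A (Python) =====
-- def reverse_first_and_last_halves(items):
--     x = items[:len(items) // 2][::-1]
--     y = items[len(items) // 2::][::-1]
--     k = 0
--     for j in range(len(x)):
--         items[k] = x[j]
--         k += 1
--     for i in range(len(y)):
--         items[k] = y[i]
--         k += 1
--     return items
-- ===== SOURCE B (Python) =====
-- def reverse_first_and_last_halves(items):
--     n = len(items)
--     mid = n // 2
--     i, j = 0, mid - 1
--     while i < j:
--         items[i], items[j] = items[j], items[i]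
--         i += 1
--         j -= 1
--     i, j = mid, n - 1
--     while i < j:
--         items[i], items[j] = items[j], items[i]
--         i += 1
--         j -= 1
--     return items
-- ===== Notes on version B (the rewrite author's own statement) =====
-- stated objective: simpler
-- what changed: B reverses each half in place with two inward-moving pointers that swap elements, instead of building reversed slice copies and copying them back index by index; no auxiliary lists are allocated.
import Mathlib
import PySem

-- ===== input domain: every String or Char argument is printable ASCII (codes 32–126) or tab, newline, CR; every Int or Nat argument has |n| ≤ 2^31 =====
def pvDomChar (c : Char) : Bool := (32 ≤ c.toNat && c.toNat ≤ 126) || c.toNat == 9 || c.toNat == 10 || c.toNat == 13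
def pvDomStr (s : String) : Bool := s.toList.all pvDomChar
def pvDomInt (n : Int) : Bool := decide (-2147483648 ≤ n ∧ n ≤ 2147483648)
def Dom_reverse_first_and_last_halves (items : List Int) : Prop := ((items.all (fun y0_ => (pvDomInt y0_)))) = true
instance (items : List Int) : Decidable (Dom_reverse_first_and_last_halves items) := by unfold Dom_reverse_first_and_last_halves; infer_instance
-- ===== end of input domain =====

-- B reverses each half in place with two inward-moving pointer swaps instead of building
-- reversed slice copies and copying them back (objective: simpler, no auxiliary lists).
-- A mutates `items` in place; B performs the same mutation (same final contents); the
-- theorems here are about the returned value.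

-- ===== PORT A =====
-- x = items[:len(items)//2][::-1]; y = items[len(items)//2:][::-1]; then two copy-back loops.
def reverse_first_and_last_halves (items : List Int) : List Int :=
  let m := PySem.Int.floordiv (PySem.List.len items) 2
  -- [::-1] always returns (getD [] never fires)
  let x := (PySem.List.slice? (PySem.List.slice items none (some m)) none none (-1)).getD []
  let y := (PySem.List.slice? (PySem.List.slice items (some m) none) none none (-1)).getD []
  -- for j in range(len(x)): items[k] = x[j]; k += 1   (k always in range, so pySetD/pyGetD are exact)
  let s1 := (PySem.List.pyRange 0 (PySem.List.len x) 1).foldl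
      (fun (st : List Int × Int) j => (PySem.List.pySetD st.1 st.2 (PySem.List.pyGetD x j 0), st.2 + 1))
      (items, 0)
  let s2 := (PySem.List.pyRange 0 (PySem.List.len y) 1).foldl
      (fun (st : List Int × Int) i => (PySem.List.pySetD st.1 st.2 (PySem.List.pyGetD y i 0), st.2 + 1))
      s1
  s2.1

-- ===== PORT B =====
-- while i < j: items[i], items[j] = items[j], items[i]; i += 1; j -= 1   (indices always in range)
def pvRevSeg (xs : List Int) (i j : Int) : List Int :=
  if h : i < j then
    pvRevSeg (PySem.List.pySetD (PySem.List.pySetD xs i (PySem.List.pyGetD xs j 0)) j (PySem.List.pyGetD xs i 0))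
      (i + 1) (j - 1)
  else xs
termination_by (j - i).toNat
decreasing_by omega

def reverse_first_and_last_halves_alt (items : List Int) : List Int :=
  let n := PySem.List.len items
  let mid := PySem.Int.floordiv n 2
  let items1 := pvRevSeg items 0 (mid - 1)
  pvRevSeg items1 mid (n - 1)

-- ===== PRECONDITION & SPEC =====
def Spec_reverse_first_and_last_halves (items : List Int) (out : List Int) : Prop := out = reverse_first_and_last_halves_alt items
instance (items : List Int) (out : List Int) : Decidable (Spec_reverse_first_and_last_halves items out) := by unfold Spec_reverse_first_and_last_halves; infer_instance

-- ===== CLAIM (what is proved, stated in full; the proofs are below) =====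
def Claim_equal_reverse_first_and_last_halves : Prop := ∀ (items : List Int), Dom_reverse_first_and_last_halves items → Spec_reverse_first_and_last_halves items (reverse_first_and_last_halves items)

-- ===== LEMMAS AND PROOFS =====

-- A's copy-back loop writes zs into L starting at position k.
lemma pvWriteLoop (zs : List Int) : ∀ (L : List Int) (k : Nat), k + zs.length ≤ L.length →
    zs.foldl (fun (st : List Int × Int) v => (PySem.List.pySetD st.1 st.2 v, st.2 + 1)) (L, (k : Int))
      = (L.take k ++ zs ++ L.drop (k + zs.length), ((k + zs.length : Nat) : Int)) := by
  induction zs with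
  | nil => intro L k h; simp
  | cons v zs ih =>
    intro L k h
    simp only [List.foldl_cons, PySem.List.pySetD_natCast]
    have hk : k < L.length := by simp at h; omega
    have h1 : ((k : Int) + 1) = ((k + 1 : Nat) : Int) := by push_cast; ring
    rw [h1, ih (L.set k v) (k + 1) (by simp; simp at h; omega)]
    simp only [Prod.mk.injEq]
    constructor
    · have htake : (L.set k v).take (k + 1) = L.take k ++ [v] := by
        rw [List.take_add_one]
        congr 1
        · exact List.take_set_of_le (le_refl k)
        · simp [List.getElem?_set_self hk]
      have hdrop : (L.set k v).drop (k + 1 + zs.length) = L.drop (k + 1 + zs.length) := by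
        apply List.ext_getElem
        · simp
        · intro i h1 h2
          simp only [List.getElem_drop, List.getElem_set]
          rw [if_neg (by omega)]
      rw [htake, hdrop]
      simp only [List.length_cons]
      rw [show k + (zs.length + 1) = k + 1 + zs.length by omega]
      simp
    · push_cast [List.length_cons]; ring

-- A equals halves-reversed-and-concatenated.
lemma pvA_eq (items : List Int) :
    reverse_first_and_last_halves items
      = (items.take (items.length / 2)).reverse ++ (items.drop (items.length / 2)).reverse := by
  have hm : PySem.Int.floordiv (PySem.List.len items) 2 = ((items.length / 2 : Nat) : Int) := by
    simp [PySem.List.len_eq]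
  simp only [reverse_first_and_last_halves, hm, PySem.List.slice_to_natCast,
    PySem.List.slice_from_natCast, PySem.List.slice?_none_none_neg_one, Option.getD_some]
  set m : Nat := items.length / 2 with hmdef
  rw [PySem.List.foldl_pyRange_zero_pyGetD ((items.take m).reverse) 0
        (fun (st : List Int × Int) v => (PySem.List.pySetD st.1 st.2 v, st.2 + 1)) (items, 0),
      PySem.List.foldl_pyRange_zero_pyGetD ((items.drop m).reverse) 0
        (fun (st : List Int × Int) v => (PySem.List.pySetD st.1 st.2 v, st.2 + 1))]
  have hmle : m ≤ items.length := Nat.div_le_self _ _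
  have h1 := pvWriteLoop (items.take m).reverse items 0 (by simp)
  rw [show (0 : Int) = ((0 : Nat) : Int) by norm_num, h1]
  simp only [List.take_zero, List.nil_append, List.length_reverse, List.length_take, Nat.zero_add]
  have hlen1 : (min m items.length) = m := by omega
  rw [hlen1]
  set L1 : List Int := (items.take m).reverse ++ items.drop m with hL1
  have hL1len : L1.length = items.length := by simp [hL1]; omega
  have h2 := pvWriteLoop (items.drop m).reverse L1 m (by simp [hL1len]; omega)
  rw [h2]
  have htake : L1.take m = (items.take m).reverse := by
    rw [hL1, List.take_append_of_le_length (by simp; omega)]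
    simp
  have hdrop : L1.drop (m + (items.drop m).reverse.length) = ([] : List Int) := by
    apply List.drop_eq_nil_of_le; simp [hL1len]; omega
  rw [htake, hdrop]; simp

-- B's two-pointer loop reverses exactly the middle segment.
lemma pvRevSeg_spec (seg : List Int) : ∀ (pre suf : List Int),
    pvRevSeg (pre ++ seg ++ suf) (pre.length) ((pre.length : Int) + seg.length - 1)
      = pre ++ seg.reverse ++ suf := by
  induction seg using List.bidirectionalRec with
  | nil =>
    intro pre suf
    rw [pvRevSeg, dif_neg (by push_cast [List.length_nil]; omega)]; simp
  | singleton a =>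
    intro pre suf
    rw [pvRevSeg, dif_neg (by push_cast [List.length_cons, List.length_nil]; omega)]; simp
  | cons_append a mid b ih =>
    intro pre suf
    have hlen : ((a :: (mid ++ [b])).length : Int) = (mid.length : Int) + 2 := by
      push_cast [List.length_cons, List.length_append, List.length_nil]; ring
    rw [pvRevSeg, dif_pos (by rw [hlen]; omega)]
    -- normalize the list shape
    simp only [List.append_assoc, List.cons_append, List.nil_append]
    have hj : ((pre.length : Int) + (a :: (mid ++ [b])).length - 1)
        = ((pre.length + (mid.length + 1) : Nat) : Int) := by rw [hlen]; push_cast; ring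
    have hget_b : PySem.List.pyGetD (pre ++ a :: (mid ++ b :: suf))
        ((pre.length + (mid.length + 1) : Nat) : Int) 0 = b := by
      rw [PySem.List.pyGetD_eq_getElem _ _ (by positivity)
        (by push_cast [List.length_append, List.length_cons, List.length_nil]; omega)]
      simp only [Int.toNat_natCast]
      rw [List.getElem_append_right (by omega)]
      simp
    have hget_a : PySem.List.pyGetD (pre ++ a :: (mid ++ b :: suf)) ((pre.length : Nat) : Int) 0 = a := by
      rw [PySem.List.pyGetD_eq_getElem _ _ (by positivity)
        (by push_cast [List.length_append, List.length_cons, List.length_nil]; omega)]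
      simp only [Int.toNat_natCast]
      rw [List.getElem_append_right (le_refl _)]
      simp
    have hset1 : (pre ++ a :: (mid ++ b :: suf)).set pre.length b
        = pre ++ b :: (mid ++ b :: suf) := by
      rw [List.set_append, if_neg (by omega)]
      simp
    have hset2 : (pre ++ b :: (mid ++ b :: suf)).set (pre.length + (mid.length + 1)) a
        = pre ++ b :: (mid ++ a :: suf) := by
      rw [List.set_append, if_neg (by omega)]
      congr 1
      rw [Nat.add_sub_cancel_left, List.set_cons_succ, List.set_append, if_neg (by omega)]
      simp
    rw [hj, hget_b]
    rw [show ((pre.length : Int)) = ((pre.length : Nat) : Int) by norm_num] at hget_a ⊢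
    rw [hget_a]
    simp only [PySem.List.pySetD_natCast]
    rw [hset1, hset2]
    have hi' : (((pre.length : Nat) : Int) + 1) = (((pre ++ [b]).length : Nat) : Int) := by
      push_cast [List.length_append, List.length_cons, List.length_nil]; ring
    have hj' : ((((pre.length + (mid.length + 1) : Nat)) : Int) - 1)
        = (((pre ++ [b]).length : Nat) : Int) + (mid.length : Int) - 1 := by
      push_cast [List.length_append, List.length_cons, List.length_nil]; ring
    rw [hi', hj']
    have := ih (pre ++ [b]) (a :: suf)
    simp only [List.append_assoc, List.cons_append, List.nil_append] at this
    rw [this]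
    simp

-- B equals halves-reversed-and-concatenated.
lemma pvB_eq (items : List Int) :
    reverse_first_and_last_halves_alt items
      = (items.take (items.length / 2)).reverse ++ (items.drop (items.length / 2)).reverse := by
  have hm : PySem.Int.floordiv (PySem.List.len items) 2 = ((items.length / 2 : Nat) : Int) := by
    simp [PySem.List.len_eq]
  have hm2 : PySem.Int.floordiv ((items.length : Int)) 2 = ((items.length / 2 : Nat) : Int) := by
    simp only [PySem.List.len_eq] at hm; exact hm
  simp only [reverse_first_and_last_halves_alt, PySem.List.len_eq, hm2]
  set m : Nat := items.length / 2 with hmdef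
  have hmle : m ≤ items.length := Nat.div_le_self _ _
  have h1 : pvRevSeg items 0 ((m : Int) - 1)
      = (items.take m).reverse ++ items.drop m := by
    have := pvRevSeg_spec (items.take m) [] (items.drop m)
    simp only [List.nil_append, List.length_nil, Nat.cast_zero, List.length_take,
      List.take_append_drop] at this
    rw [show ((m : Int) - 1) = (0 : Int) + ((min m items.length : Nat) : Int) - 1 by
      rw [show min m items.length = m by omega]; ring] at *
    simpa using this
  rw [h1]
  have h2 := pvRevSeg_spec (items.drop m) ((items.take m).reverse) []
  simp only [List.append_nil, List.length_reverse, List.length_take, List.length_drop] at h2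
  rw [show min m items.length = m by omega] at h2
  rw [show ((items.length : Int) - 1) = ((m : Nat) : Int) + ((items.length - m : Nat) : Int) - 1 by
    push_cast [Nat.cast_sub hmle]; ring] at *
  rw [show ((m : Nat) : Int) = (((items.take m).reverse.length : Nat) : Int) by simp; omega] at *
  rw [h2]

-- ===== VERDICT (by name: the statement is the Claim_ definition above) =====
theorem reverse_first_and_last_halves_spec : Claim_equal_reverse_first_and_last_halves := by
  intro items _
  unfold Spec_reverse_first_and_last_halves
  rw [pvA_eq, pvB_eq]
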